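-- pv_equiv track=rewrite | github.com/sajidibnimohd/AI-LAB | BFS8P.py | get_valid_actions
-- ===== SOURCE A (Python) =====
-- actions = [(0, -1), (0, 1), (-1, 0), (1, 0)]
--
-- def get_valid_actions(state):
--     valid_actions = []
--     empty_index = state.index(0)
--     empty_row = empty_index // 3
--     empty_col = empty_index % 3
--     for action in actions:
--         new_row = empty_row + action[0]
--         new_col = empty_col + action[1]
--         if 0 <= new_row< 3 and 0 <= new_col< 3:
--             valid_actions.append(action)
--     return valid_actions
-- ===== SOURCE B (Python) =====
-- # Precomputed table: for each empty-tile index 0..8, the valid actions in A's order.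
-- _TABLE = [
--     [(0, 1), (1, 0)],
--     [(0, -1), (0, 1), (1, 0)],
--     [(0, -1), (1, 0)],
--     [(0, 1), (-1, 0), (1, 0)],
--     [(0, -1), (0, 1), (-1, 0), (1, 0)],
--     [(0, -1), (-1, 0), (1, 0)],
--     [(0, 1), (-1, 0)],
--     [(0, -1), (0, 1), (-1, 0)],
--     [(0, -1), (-1, 0)],
-- ]
--
-- def get_valid_actions(state):
--     return list(_TABLE[state.index(0)])
-- ===== Notes on version B (the rewrite author's own statement) =====
-- stated objective: idiomatic
-- what changed: Replaces the per-call loop over candidate actions with a single lookup in a precomputed 9-entry table indexed by the empty-tile position.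
-- outside the precondition, e.g. on get_valid_actions([1, 2, 3, 4, 5, 6, 7, 8, 9, 0]): A returns [(-1, 0)], B raises IndexError
import Mathlib
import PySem

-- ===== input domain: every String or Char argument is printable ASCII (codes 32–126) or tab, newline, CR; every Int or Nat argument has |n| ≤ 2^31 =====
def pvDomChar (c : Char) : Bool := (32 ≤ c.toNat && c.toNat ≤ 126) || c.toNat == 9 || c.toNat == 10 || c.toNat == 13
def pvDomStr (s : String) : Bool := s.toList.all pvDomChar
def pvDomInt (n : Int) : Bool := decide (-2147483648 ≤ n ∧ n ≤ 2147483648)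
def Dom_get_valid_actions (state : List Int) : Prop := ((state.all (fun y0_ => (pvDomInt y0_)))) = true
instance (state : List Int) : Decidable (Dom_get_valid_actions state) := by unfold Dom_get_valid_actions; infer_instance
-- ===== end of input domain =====

-- B replaces A's per-call filtering loop with a precomputed 9-entry table indexed by the empty-tile index.

-- ===== PORT A =====
def pvActions : List (Int × Int) := [(0, -1), (0, 1), (-1, 0), (1, 0)]

def get_valid_actions (state : List Int) : List (Int × Int) :=
  match PySem.List.index? state 0 with
  | none => []   -- state.index(0) raises ValueError; excluded by Pre_
  | some empty_index =>
    let empty_row : Int := PySem.Int.floordiv (empty_index : Int) 3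
    let empty_col : Int := PySem.Int.mod (empty_index : Int) 3
    pvActions.foldl (fun valid_actions action =>
      let new_row := empty_row + action.1
      let new_col := empty_col + action.2
      if 0 ≤ new_row ∧ new_row < 3 ∧ 0 ≤ new_col ∧ new_col < 3 then
        valid_actions ++ [action]
      else valid_actions) []

-- ===== PORT B =====
def pvTable : List (List (Int × Int)) :=
  [ [(0, 1), (1, 0)],
    [(0, -1), (0, 1), (1, 0)],
    [(0, -1), (1, 0)],
    [(0, 1), (-1, 0), (1, 0)],
    [(0, -1), (0, 1), (-1, 0), (1, 0)],
    [(0, -1), (-1, 0), (1, 0)],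
    [(0, 1), (-1, 0)],
    [(0, -1), (0, 1), (-1, 0)],
    [(0, -1), (-1, 0)] ]

def get_valid_actions_alt (state : List Int) : List (Int × Int) :=
  match PySem.List.index? state 0 with
  | none => []   -- state.index(0) raises ValueError; excluded by Pre_
  | some i => (PySem.List.pyGet? pvTable (i : Int)).getD []  -- _TABLE[i]; none = IndexError, excluded by Pre_

-- ===== PRECONDITION & SPEC =====
-- Pre_ excludes states without a 0 (A raises ValueError) and states whose first 0 sits at index ≥ 9,
-- which are not 8-puzzle boards: A's generic filter still returns an accidental value there while B's
-- 9-entry table lookup raises IndexError.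
def Pre_get_valid_actions (state : List Int) : Prop := 0 ∈ state.take 9
instance (state : List Int) : Decidable (Pre_get_valid_actions state) := by unfold Pre_get_valid_actions; infer_instance

def pvWitness_get_valid_actions : List Int := [1, 2, 3, 4, 5, 6, 7, 8, 0]

def Spec_get_valid_actions (state : List Int) (out : List (Int × Int)) : Prop := out = get_valid_actions_alt state
instance (state : List Int) (out : List (Int × Int)) : Decidable (Spec_get_valid_actions state out) := by unfold Spec_get_valid_actions; infer_instance

-- ===== CLAIM (what is proved, stated in full; the proofs are below) =====
def Claim_equal_get_valid_actions : Prop := ∀ (state : List Int), Dom_get_valid_actions state → Pre_get_valid_actions state → Spec_get_valid_actions state (get_valid_actions state)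

-- ===== LEMMAS AND PROOFS =====

-- If 0 occurs among the first n elements, index? finds it at some k < n.
theorem index_lt_of_mem_take (xs : List Int) (n : Nat) (h : 0 ∈ xs.take n) :
    ∃ k, PySem.List.index? xs 0 = some k ∧ k < n := by
  induction xs generalizing n with
  | nil => simp at h
  | cons x t ih =>
    cases n with
    | zero => simp at h
    | succ m =>
      by_cases hx : x = 0
      · subst hx
        exact ⟨0, PySem.List.index?_cons_self 0 t, Nat.succ_pos m⟩
      · simp only [List.take_succ_cons, List.mem_cons] at h
        rcases h with h0 | h0
        · exact absurd h0.symm hx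
        · obtain ⟨k, hk, hkn⟩ := ih m h0
          refine ⟨k + 1, ?_, by omega⟩
          rw [PySem.List.index?_cons_of_ne t hx, hk]; rfl

-- ===== VERDICT (by name: the statement is the Claim_ definition above) =====
theorem get_valid_actions_spec : Claim_equal_get_valid_actions := by
  intro state _ hpre
  unfold Spec_get_valid_actions
  obtain ⟨k, hk, hk9⟩ := index_lt_of_mem_take state 9 hpre
  unfold get_valid_actions get_valid_actions_alt
  rw [hk]
  interval_cases k <;> decide
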